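-- pv_equiv track=rewrite | github.com/pyk-kentech/GNN | MAGIC/utils/role_typing_objectlike5.py | score_edge_attr
-- ===== SOURCE A (Python) =====
-- NET_COMMON = {"EVENT_RECVMSG", "EVENT_SENDMSG"}
--
-- FILE_COMMON = {"EVENT_READ", "EVENT_WRITE", "EVENT_OPEN", "EVENT_CLOSE"}
--
-- NET_RARE = {"EVENT_CONNECT", "EVENT_ACCEPT"}
--
-- FILE_RARE = {
--     "EVENT_UNLINK",
--     "EVENT_CREATE_OBJECT",
--     "EVENT_TRUNCATE",
--     "EVENT_RENAME",
--     "EVENT_LOADLIBRARY",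
-- }
--
-- def score_edge_attr(attr: dict, rare_weight: int = 3):
--     cnt_common = attr.get("cnt_common", {}) or {}
--     rare_flags = attr.get("rare_flags", {}) or {}
--
--     net = 0
--     fil = 0
--
--     for ev, c in cnt_common.items():
--         if not c:
--             continue
--         if ev in NET_COMMON:
--             net += c
--         elif ev in FILE_COMMON:
--             fil += c
--
--     for ev, flag in rare_flags.items():
--         if not flag:
--             continue
--         if ev in NET_RARE:
--             net += rare_weight
--         elif ev in FILE_RARE:
--             fil += rare_weight
--
--     return net, fil
-- ===== SOURCE B (Python) =====
-- NET_COMMON_EVENTS = ("EVENT_RECVMSG", "EVENT_SENDMSG")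
-- FILE_COMMON_EVENTS = ("EVENT_READ", "EVENT_WRITE", "EVENT_OPEN", "EVENT_CLOSE")
-- NET_RARE_EVENTS = ("EVENT_CONNECT", "EVENT_ACCEPT")
-- FILE_RARE_EVENTS = ("EVENT_UNLINK", "EVENT_CREATE_OBJECT", "EVENT_TRUNCATE",
--                     "EVENT_RENAME", "EVENT_LOADLIBRARY")
--
--
-- def score_edge_attr(attr: dict, rare_weight: int = 3):
--     cnt_common = attr.get("cnt_common") or {}
--     rare_flags = attr.get("rare_flags") or {}
--     net = sum(cnt_common.get(ev, 0) for ev in NET_COMMON_EVENTS)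
--     net += sum(rare_weight for ev in NET_RARE_EVENTS if rare_flags.get(ev))
--     fil = sum(cnt_common.get(ev, 0) for ev in FILE_COMMON_EVENTS)
--     fil += sum(rare_weight for ev in FILE_RARE_EVENTS if rare_flags.get(ev))
--     return net, fil
-- ===== Notes on version B (the rewrite author's own statement) =====
-- stated objective: simpler
-- what changed: B inverts the traversal: instead of iterating over the input dicts and testing membership in the four category sets, it iterates over the four fixed category tuples and looks each event up in cnt_common/rare_flags, summing the looked-up counts (the falsy-skip is absorbed because a zero count adds zero) and adding rare_weight per truthy rare flag.
import Mathlib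
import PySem

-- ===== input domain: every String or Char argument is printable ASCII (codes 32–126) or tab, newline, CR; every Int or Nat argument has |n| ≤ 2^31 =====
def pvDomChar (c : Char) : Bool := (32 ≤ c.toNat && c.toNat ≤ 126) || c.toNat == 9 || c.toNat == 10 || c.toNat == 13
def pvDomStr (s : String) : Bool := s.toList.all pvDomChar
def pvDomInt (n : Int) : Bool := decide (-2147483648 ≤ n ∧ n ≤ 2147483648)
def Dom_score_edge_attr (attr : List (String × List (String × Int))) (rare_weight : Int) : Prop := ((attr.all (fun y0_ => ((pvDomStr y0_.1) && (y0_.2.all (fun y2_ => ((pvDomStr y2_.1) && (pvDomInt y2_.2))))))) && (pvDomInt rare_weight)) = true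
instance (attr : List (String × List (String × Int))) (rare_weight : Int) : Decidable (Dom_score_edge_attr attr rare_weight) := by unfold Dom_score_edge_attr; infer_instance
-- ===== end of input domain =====

-- B inverts the traversal: it loops over the four fixed category sets looking each event up in
-- cnt_common/rare_flags, instead of looping over the input dicts and testing set membership
-- (objective: simpler; same cost — both are small).

-- ===== PORT A =====
-- the module-level Python set constants
def pvNET_COMMON : PySem.Set String := PySem.Set.ofList ["EVENT_RECVMSG", "EVENT_SENDMSG"]
def pvFILE_COMMON : PySem.Set String := PySem.Set.ofList ["EVENT_READ", "EVENT_WRITE", "EVENT_OPEN", "EVENT_CLOSE"]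
def pvNET_RARE : PySem.Set String := PySem.Set.ofList ["EVENT_CONNECT", "EVENT_ACCEPT"]
def pvFILE_RARE : PySem.Set String := PySem.Set.ofList ["EVENT_UNLINK", "EVENT_CREATE_OBJECT", "EVENT_TRUNCATE", "EVENT_RENAME", "EVENT_LOADLIBRARY"]

-- the Python caller passes dicts; the association-list arguments are read as Python builds the
-- dict from them (first key position, last value wins) via PySem.Dict.ofList
def score_edge_attr (attr : List (String × List (String × Int))) (rare_weight : Int) : Int × Int :=
  let d := PySem.Dict.ofList attr
  let cnt_common := PySem.Dict.ofList (d.getD "cnt_common" [])   -- 'or {}': empty stays empty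
  let rare_flags := PySem.Dict.ofList (d.getD "rare_flags" [])
  let s1 := cnt_common.items.foldl (fun (acc : Int × Int) p =>
      if p.2 = 0 then acc                                        -- 'if not c: continue'
      else if p.1 ∈ pvNET_COMMON then (acc.1 + p.2, acc.2)
      else if p.1 ∈ pvFILE_COMMON then (acc.1, acc.2 + p.2)
      else acc) (0, 0)
  rare_flags.items.foldl (fun (acc : Int × Int) p =>
      if p.2 = 0 then acc                                        -- 'if not flag: continue'
      else if p.1 ∈ pvNET_RARE then (acc.1 + rare_weight, acc.2)
      else if p.1 ∈ pvFILE_RARE then (acc.1, acc.2 + rare_weight)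
      else acc) s1

-- ===== PORT B =====
def score_edge_attr_alt (attr : List (String × List (String × Int))) (rare_weight : Int) : Int × Int :=
  let d := PySem.Dict.ofList attr
  let cnt_common := PySem.Dict.ofList (d.getD "cnt_common" [])
  let rare_flags := PySem.Dict.ofList (d.getD "rare_flags" [])
  let net := (pvNET_COMMON.map (fun ev => cnt_common.getD ev 0)).sum
      + ((pvNET_RARE.filter (fun ev => rare_flags.getD ev 0 ≠ 0)).map (fun _ => rare_weight)).sum
  let fil := (pvFILE_COMMON.map (fun ev => cnt_common.getD ev 0)).sum
      + ((pvFILE_RARE.filter (fun ev => rare_flags.getD ev 0 ≠ 0)).map (fun _ => rare_weight)).sum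
  (net, fil)

-- ===== PRECONDITION & SPEC =====
def Spec_score_edge_attr (attr : List (String × List (String × Int))) (rare_weight : Int) (out : Int × Int) : Prop := out = score_edge_attr_alt attr rare_weight
instance (attr : List (String × List (String × Int))) (rare_weight : Int) (out : Int × Int) : Decidable (Spec_score_edge_attr attr rare_weight out) := by unfold Spec_score_edge_attr; infer_instance

-- ===== CLAIM (what is proved, stated in full; the proofs are below) =====
def Claim_equal_score_edge_attr : Prop := ∀ (attr : List (String × List (String × Int))) (rare_weight : Int), Dom_score_edge_attr attr rare_weight → Spec_score_edge_attr attr rare_weight (score_edge_attr attr rare_weight)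

-- ===== LEMMAS AND PROOFS =====

-- a pair-fold whose step adds componentwise is the pair of sums
lemma pvFoldlPair (l : List (String × Int)) (g h : String × Int → Int) (acc : Int × Int) :
    l.foldl (fun (a : Int × Int) p => (a.1 + g p, a.2 + h p)) acc
      = (acc.1 + (l.map g).sum, acc.2 + (l.map h).sum) := by
  induction l generalizing acc with
  | nil => simp
  | cons p l ih => simp [ih]; constructor <;> ring

-- summing 'if k = ev then v k else 0' over a duplicate-free key list picks the one hit
lemma pvSumPick (K : List String) (hK : K.Nodup) (v : String → Int) (ev : String) :
    (K.map (fun k => if k = ev then v k else 0)).sum = if ev ∈ K then v ev else 0 := by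
  induction K with
  | nil => simp
  | cons a K ih =>
    simp only [List.nodup_cons] at hK
    simp only [List.map_cons, List.sum_cons, List.mem_cons, ih hK.2]
    by_cases ha : a = ev
    · subst ha
      simp [hK.1]
    · have hev : ¬ ev = a := fun h => ha h.symm
      simp [ha, hev]

-- membership in a duplicate-free event list splits the sum into one lookup per event
lemma pvSumMem (E : List String) (hE : E.Nodup) (K : List String) (hK : K.Nodup) (v : String → Int) :
    (K.map (fun k => if k ∈ E then v k else 0)).sum
      = (E.map (fun ev => if ev ∈ K then v ev else 0)).sum := by
  induction E with
  | nil => simp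
  | cons e E ih =>
    simp only [List.nodup_cons] at hE
    have hsplit : ∀ k, (if k ∈ e :: E then v k else 0)
        = (if k = e then v k else 0) + (if k ∈ E then v k else 0) := by
      intro k
      by_cases h1 : k = e
      · subst h1; simp [hE.1]
      · by_cases h2 : k ∈ E <;> simp [List.mem_cons, h1, h2]
    calc (K.map (fun k => if k ∈ e :: E then v k else 0)).sum
        = (K.map (fun k => (if k = e then v k else 0) + (if k ∈ E then v k else 0))).sum := by
          congr 1; exact List.map_congr_left (fun k _ => hsplit k)
      _ = (K.map (fun k => if k = e then v k else 0)).sum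
            + (K.map (fun k => if k ∈ E then v k else 0)).sum := by
          rw [← List.sum_map_add]
      _ = (if e ∈ K then v e else 0) + (E.map (fun ev => if ev ∈ K then v ev else 0)).sum := by
          rw [pvSumPick K hK v e, ih hE.2]
      _ = ((e :: E).map (fun ev => if ev ∈ K then v ev else 0)).sum := by simp

-- sum over a filter of a constant = sum of guarded constants
lemma pvFilterConstSum (E : List String) (p : String → Bool) (c : Int) :
    ((E.filter p).map (fun _ => c)).sum = (E.map (fun ev => if p ev then c else 0)).sum := by
  induction E with
  | nil => simp
  | cons e E ih =>
    by_cases h : p e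
    · simp only [List.filter_cons, h, if_pos, List.map_cons, List.sum_cons]
      rw [ih]
    · simp only [List.filter_cons, h, List.map_cons, List.sum_cons, ite_false,
        Bool.false_eq_true]
      rw [ih, zero_add]

-- for a key-nodup dict: 'if ev in keys then getD else 0' is just getD (missing key gives 0)
lemma pvLookupOut (d : PySem.Dict String (Int)) (ev : String) (hout : ev ∉ d.keys) :
    d.getD ev 0 = 0 := by
  apply PySem.Dict.getD_of_not_contains
  rw [PySem.Dict.contains_eq_decide_mem_keys]
  simp [hout]

-- the two common sets and the two rare sets are disjoint (string literals)
lemma pvDisjNCFC : ∀ k ∈ pvNET_COMMON, k ∉ pvFILE_COMMON := by decide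
lemma pvDisjNRFR : ∀ k ∈ pvNET_RARE, k ∉ pvFILE_RARE := by decide

-- membership-guarded lookup sum over the keys = plain lookup sum over the event list
lemma pvKeysSumCommon (d : PySem.Dict String Int) (hnd : d.keys.Nodup)
    (E : List String) (hE : E.Nodup) :
    (d.keys.map (fun k => if k ∈ E then d.getD k 0 else 0)).sum
      = (E.map (fun ev => d.getD ev 0)).sum := by
  rw [pvSumMem E hE d.keys hnd]
  congr 1
  apply List.map_congr_left
  intro ev _
  by_cases h : ev ∈ d.keys
  · rw [if_pos h]
  · rw [if_neg h, pvLookupOut d ev h]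

-- membership-guarded flag sum over the keys = the filtered constant sum over the event list
lemma pvKeysSumRare (d : PySem.Dict String Int) (hnd : d.keys.Nodup)
    (E : List String) (hE : E.Nodup) (w : Int) :
    (d.keys.map (fun k => if k ∈ E then (if d.getD k 0 = 0 then 0 else w) else 0)).sum
      = ((E.filter (fun ev => d.getD ev 0 ≠ 0)).map (fun _ => w)).sum := by
  rw [pvSumMem E hE d.keys hnd, pvFilterConstSum]
  congr 1
  apply List.map_congr_left
  intro ev _
  by_cases h : ev ∈ d.keys
  · rw [if_pos h]
    by_cases h0 : d.getD ev 0 = 0 <;> simp [h0]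
  · rw [if_neg h, pvLookupOut d ev h]
    simp

-- the common-count loop over a key-nodup dict equals the category-driven lookups
lemma pvCommonLoop (d : PySem.Dict String Int) (hnd : d.keys.Nodup) (acc : Int × Int) :
    d.items.foldl (fun (a : Int × Int) p =>
      if p.2 = 0 then a
      else if p.1 ∈ pvNET_COMMON then (a.1 + p.2, a.2)
      else if p.1 ∈ pvFILE_COMMON then (a.1, a.2 + p.2)
      else a) acc
    = (acc.1 + (pvNET_COMMON.map (fun ev => d.getD ev 0)).sum,
       acc.2 + (pvFILE_COMMON.map (fun ev => d.getD ev 0)).sum) := by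
  have hstep : (fun (a : Int × Int) (p : String × Int) =>
      if p.2 = 0 then a
      else if p.1 ∈ pvNET_COMMON then (a.1 + p.2, a.2)
      else if p.1 ∈ pvFILE_COMMON then (a.1, a.2 + p.2)
      else a)
      = (fun a p => (a.1 + (if p.1 ∈ pvNET_COMMON then p.2 else 0),
          a.2 + (if p.1 ∈ pvNET_COMMON then 0 else if p.1 ∈ pvFILE_COMMON then p.2 else 0))) := by
    funext a p
    by_cases h0 : p.2 = 0 <;> by_cases h1 : p.1 ∈ pvNET_COMMON <;>
      by_cases h2 : p.1 ∈ pvFILE_COMMON <;> simp [h0, h1, h2]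
  rw [hstep, pvFoldlPair, PySem.Dict.items_eq_map_keys d hnd 0, List.map_map, List.map_map]
  have hfil : (d.keys.map ((fun (p : String × Int) =>
        if p.1 ∈ pvNET_COMMON then 0 else if p.1 ∈ pvFILE_COMMON then p.2 else 0) ∘
        fun k => (k, d.getD k 0))).sum
      = (d.keys.map (fun k => if k ∈ pvFILE_COMMON then d.getD k 0 else 0)).sum := by
    congr 1
    apply List.map_congr_left
    intro k _
    simp only [Function.comp_apply]
    by_cases h1 : k ∈ pvNET_COMMON
    · simp [h1, pvDisjNCFC k h1]
    · simp [h1]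
  rw [hfil, pvKeysSumCommon d hnd _ (by decide)]
  have hnet : (d.keys.map ((fun (p : String × Int) =>
        if p.1 ∈ pvNET_COMMON then p.2 else 0) ∘ fun k => (k, d.getD k 0))).sum
      = (d.keys.map (fun k => if k ∈ pvNET_COMMON then d.getD k 0 else 0)).sum := by
    congr 1
  rw [hnet, pvKeysSumCommon d hnd _ (by decide)]

-- the rare-flag loop over a key-nodup dict equals the category-driven lookups
lemma pvRareLoop (d : PySem.Dict String Int) (hnd : d.keys.Nodup) (w : Int) (acc : Int × Int) :
    d.items.foldl (fun (a : Int × Int) p =>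
      if p.2 = 0 then a
      else if p.1 ∈ pvNET_RARE then (a.1 + w, a.2)
      else if p.1 ∈ pvFILE_RARE then (a.1, a.2 + w)
      else a) acc
    = (acc.1 + ((pvNET_RARE.filter (fun ev => d.getD ev 0 ≠ 0)).map (fun _ => w)).sum,
       acc.2 + ((pvFILE_RARE.filter (fun ev => d.getD ev 0 ≠ 0)).map (fun _ => w)).sum) := by
  have hstep : (fun (a : Int × Int) (p : String × Int) =>
      if p.2 = 0 then a
      else if p.1 ∈ pvNET_RARE then (a.1 + w, a.2)
      else if p.1 ∈ pvFILE_RARE then (a.1, a.2 + w)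
      else a)
      = (fun a p => (a.1 + (if p.1 ∈ pvNET_RARE then (if p.2 = 0 then 0 else w) else 0),
          a.2 + (if p.1 ∈ pvNET_RARE then 0
            else if p.1 ∈ pvFILE_RARE then (if p.2 = 0 then 0 else w) else 0))) := by
    funext a p
    by_cases h0 : p.2 = 0 <;> by_cases h1 : p.1 ∈ pvNET_RARE <;>
      by_cases h2 : p.1 ∈ pvFILE_RARE <;> simp [h0, h1, h2]
  rw [hstep, pvFoldlPair, PySem.Dict.items_eq_map_keys d hnd 0, List.map_map, List.map_map]
  have hfil : (d.keys.map ((fun (p : String × Int) =>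
        if p.1 ∈ pvNET_RARE then 0
        else if p.1 ∈ pvFILE_RARE then (if p.2 = 0 then 0 else w) else 0) ∘
        fun k => (k, d.getD k 0))).sum
      = (d.keys.map (fun k =>
          if k ∈ pvFILE_RARE then (if d.getD k 0 = 0 then 0 else w) else 0)).sum := by
    congr 1
    apply List.map_congr_left
    intro k _
    simp only [Function.comp_apply]
    by_cases h1 : k ∈ pvNET_RARE
    · simp [h1, pvDisjNRFR k h1]
    · simp [h1]
  rw [hfil, pvKeysSumRare d hnd _ (by decide)]
  have hnet : (d.keys.map ((fun (p : String × Int) =>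
        if p.1 ∈ pvNET_RARE then (if p.2 = 0 then 0 else w) else 0) ∘
        fun k => (k, d.getD k 0))).sum
      = (d.keys.map (fun k =>
          if k ∈ pvNET_RARE then (if d.getD k 0 = 0 then 0 else w) else 0)).sum := by
    congr 1
  rw [hnet, pvKeysSumRare d hnd _ (by decide)]

-- ===== VERDICT (by name: the statement is the Claim_ definition above) =====
theorem score_edge_attr_spec : Claim_equal_score_edge_attr := by
  intro attr rare_weight _
  unfold Spec_score_edge_attr score_edge_attr score_edge_attr_alt
  dsimp only
  rw [pvCommonLoop _ (PySem.Dict.nodup_keys_ofList _) (0, 0),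
      pvRareLoop _ (PySem.Dict.nodup_keys_ofList _) rare_weight]
  simp
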